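-- pv_equiv track=rewrite | github.com/thisis-none127-2/NLP | TextPreprocessing.py | stemming
-- ===== SOURCE A (Python) =====
-- def stemming(tokens):
--     suffixes = ["ing", "ed", "ly", "s"]
--     result = []
--     for word in tokens:
--         for suf in suffixes:
--             if word.endswith(suf) and len(word) > len(suf) + 2:
--                 word = word[:-len(suf)]
--                 break
--         result.append(word)
--     return result
-- ===== SOURCE B (Python) =====
-- # Table-dispatch stemmer: the four suffixes end in distinct letters, so a dict
-- # keyed by the word's last character replaces A's priority loop over suffixes.
-- _CUT = {"g": ("ing", 3), "d": ("ed", 2), "y": ("ly", 2), "s": ("s", 1)}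
--
--
-- def stemming(tokens):
--     def stem(w):
--         suf, k = _CUT.get(w[-1:], ("", 0))
--         if k != 0 and len(w) > k + 2 and w.endswith(suf):
--             return w[: len(w) - k]
--         return w
--
--     return [stem(w) for w in tokens]
-- ===== Notes on version B (the rewrite author's own statement) =====
-- stated objective: alternative
-- what changed: Replaces A's priority loop over a suffix list (with break) by a single table dispatch: a dict keyed by the word's last character (the four suffixes end in distinct letters) gives the unique candidate suffix and cut length, checked once per word.
import Mathlib
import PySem

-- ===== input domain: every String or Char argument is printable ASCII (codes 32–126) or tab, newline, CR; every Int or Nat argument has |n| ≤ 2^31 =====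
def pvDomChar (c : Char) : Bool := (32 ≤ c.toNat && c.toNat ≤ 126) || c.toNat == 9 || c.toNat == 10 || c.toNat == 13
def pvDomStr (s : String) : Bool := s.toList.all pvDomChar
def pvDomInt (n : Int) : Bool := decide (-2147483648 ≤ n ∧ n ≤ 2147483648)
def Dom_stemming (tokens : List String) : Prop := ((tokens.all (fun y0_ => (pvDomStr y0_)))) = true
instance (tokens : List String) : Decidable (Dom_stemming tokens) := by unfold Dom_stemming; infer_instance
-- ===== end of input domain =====

-- B replaces A's priority loop over a suffix list by a table dispatch on the word's
-- last character (the four suffixes end in distinct letters); objective: alternative.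

-- ===== PORT A =====
def stemming (tokens : List String) : List String :=
  let suffixes : List String := ["ing", "ed", "ly", "s"]
  tokens.foldl (fun result word =>
    let word :=
      (suffixes.foldl (fun (st : String × Bool) suf =>
        if st.2 then st                                    -- 'break' already taken
        else if PySem.Str.endswith st.1 suf = true ∧ PySem.Str.len st.1 > PySem.Str.len suf + 2 then
          (PySem.Str.slice st.1 none (some (-(PySem.Str.len suf))), true)
        else st) (word, false)).1
    result ++ [word]) []

-- ===== PORT B =====
def pvCut : PySem.Dict String (String × Int) :=
  PySem.Dict.ofList [("g", ("ing", 3)), ("d", ("ed", 2)), ("y", ("ly", 2)), ("s", ("s", 1))]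

def pvStem (w : String) : String :=
  let p := pvCut.getD (PySem.Str.slice w (some (-1)) none) ("", 0)
  if p.2 ≠ 0 ∧ PySem.Str.len w > p.2 + 2 ∧ PySem.Str.endswith w p.1 = true then
    PySem.Str.slice w none (some (PySem.Str.len w - p.2))
  else w

def stemming_alt (tokens : List String) : List String := tokens.map pvStem

-- ===== PRECONDITION & SPEC =====
def Spec_stemming (tokens : List String) (out : List String) : Prop := out = stemming_alt tokens
instance (tokens : List String) (out : List String) : Decidable (Spec_stemming tokens out) := by unfold Spec_stemming; infer_instance

-- ===== CLAIM (what is proved, stated in full; the proofs are below) =====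
def Claim_equal_stemming : Prop := ∀ (tokens : List String), Dom_stemming tokens → Spec_stemming tokens (stemming tokens)

-- ===== LEMMAS AND PROOFS =====

theorem pv_ends_false (cs p : List Char) (h : ¬ p <:+ cs) : PySem.Chars.endswith cs p = false := by
  rw [← Bool.not_eq_true, PySem.Chars.endswith_iff]; exact h

theorem pv_ends_true (cs p : List Char) (h : p <:+ cs) : PySem.Chars.endswith cs p = true :=
  (PySem.Chars.endswith_iff cs p).mpr h

theorem pv_slice_eq (w : String) (k : Int) (hk : 0 < k) (h : k ≤ PySem.Str.len w) :
    PySem.Str.slice w none (some (-k)) = PySem.Str.slice w none (some (PySem.Str.len w - k)) := by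
  simp only [PySem.Str.slice, PySem.Chars.slice_eq_listSlice]
  have h1 : -k = -((k.toNat : Nat) : Int) := by omega
  have h2 : (PySem.Str.len w - k) = ((w.toList.length - k.toNat : Nat) : Int) := by
    have := PySem.Str.len_eq w; omega
  rw [h1, PySem.List.slice_to_neg_natCast w.toList k.toNat (by omega), h2,
      PySem.List.slice_to_natCast]

theorem pv_key (w : String) (rl : List Char) (c : Char) (hw : w.toList = rl.reverse ++ [c]) :
    PySem.Str.slice w (some (-1)) none = String.ofList [c] := by
  simp [PySem.Str.slice, hw, PySem.List.slice_from_neg_one]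

theorem pv_getD_other (c : Char) (hg : c ≠ 'g') (hd : c ≠ 'd') (hy : c ≠ 'y') (hs : c ≠ 's') :
    pvCut.getD (String.ofList [c]) ("", 0) = ("", 0) := by
  have e : ∀ d : Char, String.ofList [d] = String.ofList [c] → d = c := by
    intro d h; simpa using String.ofList_inj.mp h
  have k1 : ¬ (String.ofList [c] = "g") := fun h => hg ((e 'g' h.symm).symm)
  have k2 : ¬ (String.ofList [c] = "d") := fun h => hd ((e 'd' h.symm).symm)
  have k3 : ¬ (String.ofList [c] = "y") := fun h => hy ((e 'y' h.symm).symm)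
  have k4 : ¬ (String.ofList [c] = "s") := fun h => hs ((e 's' h.symm).symm)
  simp [pvCut, PySem.Dict.getD, PySem.Dict.ofList, PySem.Dict.update, pysem, k1, k2, k3, k4]

theorem pv_word_eq (w : String) :
    (( ["ing", "ed", "ly", "s"].foldl (fun (st : String × Bool) suf =>
        if st.2 then st
        else if PySem.Str.endswith st.1 suf = true ∧ PySem.Str.len st.1 > PySem.Str.len suf + 2 then
          (PySem.Str.slice st.1 none (some (-(PySem.Str.len suf))), true)
        else st) (w, false)).1) = pvStem w := by
  rcases hrev : w.toList.reverse with _ | ⟨c, rl⟩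
  · -- empty word
    have hw : w = "" := by
      apply String.toList_inj.mp
      have := congrArg List.reverse hrev
      simpa using this
    subst hw; decide
  · have hw : w.toList = rl.reverse ++ [c] := by
      have := congrArg List.reverse hrev
      simpa using this
    have hkey := pv_key w rl c hw
    by_cases hg : c = 'g'
    · subst hg
      have hdict : pvCut.getD (String.ofList ['g']) ("", 0) = ("ing", 3) := by decide
      have hed : PySem.Chars.endswith w.toList ['e','d'] = false := by
        apply pv_ends_false; rw [hw, ← List.reverse_prefix]; simp
      have hly : PySem.Chars.endswith w.toList ['l','y'] = false := by
        apply pv_ends_false; rw [hw, ← List.reverse_prefix]; simp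
      have hs : PySem.Chars.endswith w.toList ['s'] = false := by
        apply pv_ends_false; rw [hw, ← List.reverse_prefix]; simp
      by_cases hpre : ['n','i'] <+: rl
      · have hing : PySem.Chars.endswith w.toList ['i','n','g'] = true := by
          apply pv_ends_true; rw [hw, ← List.reverse_prefix]
          simp [List.cons_prefix_cons, hpre]
        by_cases hlen : 5 < w.length
        · simp [List.foldl, hing, pvStem, hkey, hdict, hlen]
          have h := pv_slice_eq w 3 (by norm_num)
            (by simp [PySem.Str.len_eq]; omega)
          simpa [PySem.Str.len_eq] using h
        · simp [List.foldl, hing, hed, hly, hs, pvStem, hkey, hdict, hlen]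
      · have hing : PySem.Chars.endswith w.toList ['i','n','g'] = false := by
          apply pv_ends_false; rw [hw, ← List.reverse_prefix]
          simp [List.cons_prefix_cons, hpre]
        simp [List.foldl, hing, hed, hly, hs, pvStem, hkey, hdict]
    · by_cases hd : c = 'd'
      · subst hd
        have hdict : pvCut.getD (String.ofList ['d']) ("", 0) = ("ed", 2) := by decide
        have hing : PySem.Chars.endswith w.toList ['i','n','g'] = false := by
          apply pv_ends_false; rw [hw, ← List.reverse_prefix]; simp
        have hly : PySem.Chars.endswith w.toList ['l','y'] = false := by
          apply pv_ends_false; rw [hw, ← List.reverse_prefix]; simp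
        have hs : PySem.Chars.endswith w.toList ['s'] = false := by
          apply pv_ends_false; rw [hw, ← List.reverse_prefix]; simp
        by_cases hpre : ['e'] <+: rl
        · have hed : PySem.Chars.endswith w.toList ['e','d'] = true := by
            apply pv_ends_true; rw [hw, ← List.reverse_prefix]
            simp [List.cons_prefix_cons, hpre]
          by_cases hlen : 4 < w.length
          · simp [List.foldl, hing, hed, pvStem, hkey, hdict, hlen]
            have h := pv_slice_eq w 2 (by norm_num)
              (by simp [PySem.Str.len_eq]; omega)
            simpa [PySem.Str.len_eq] using h
          · simp [List.foldl, hing, hed, hly, hs, pvStem, hkey, hdict, hlen]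
        · have hed : PySem.Chars.endswith w.toList ['e','d'] = false := by
            apply pv_ends_false; rw [hw, ← List.reverse_prefix]
            simp [List.cons_prefix_cons, hpre]
          simp [List.foldl, hing, hed, hly, hs, pvStem, hkey, hdict]
      · by_cases hy : c = 'y'
        · subst hy
          have hdict : pvCut.getD (String.ofList ['y']) ("", 0) = ("ly", 2) := by decide
          have hing : PySem.Chars.endswith w.toList ['i','n','g'] = false := by
            apply pv_ends_false; rw [hw, ← List.reverse_prefix]; simp
          have hed : PySem.Chars.endswith w.toList ['e','d'] = false := by
            apply pv_ends_false; rw [hw, ← List.reverse_prefix]; simp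
          have hs : PySem.Chars.endswith w.toList ['s'] = false := by
            apply pv_ends_false; rw [hw, ← List.reverse_prefix]; simp
          by_cases hpre : ['l'] <+: rl
          · have hly : PySem.Chars.endswith w.toList ['l','y'] = true := by
              apply pv_ends_true; rw [hw, ← List.reverse_prefix]
              simp [List.cons_prefix_cons, hpre]
            by_cases hlen : 4 < w.length
            · simp [List.foldl, hing, hed, hly, pvStem, hkey, hdict, hlen]
              have h := pv_slice_eq w 2 (by norm_num)
                (by simp [PySem.Str.len_eq]; omega)
              simpa [PySem.Str.len_eq] using h
            · simp [List.foldl, hing, hed, hly, hs, pvStem, hkey, hdict, hlen]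
          · have hly : PySem.Chars.endswith w.toList ['l','y'] = false := by
              apply pv_ends_false; rw [hw, ← List.reverse_prefix]
              simp [List.cons_prefix_cons, hpre]
            simp [List.foldl, hing, hed, hly, hs, pvStem, hkey, hdict]
        · by_cases hs : c = 's'
          · subst hs
            have hdict : pvCut.getD (String.ofList ['s']) ("", 0) = ("s", 1) := by decide
            have hing : PySem.Chars.endswith w.toList ['i','n','g'] = false := by
              apply pv_ends_false; rw [hw, ← List.reverse_prefix]; simp
            have hed : PySem.Chars.endswith w.toList ['e','d'] = false := by
              apply pv_ends_false; rw [hw, ← List.reverse_prefix]; simp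
            have hly : PySem.Chars.endswith w.toList ['l','y'] = false := by
              apply pv_ends_false; rw [hw, ← List.reverse_prefix]; simp
            have hes : PySem.Chars.endswith w.toList ['s'] = true := by
              apply pv_ends_true; rw [hw, ← List.reverse_prefix]; simp
            by_cases hlen : 3 < w.length
            · simp [List.foldl, hing, hed, hly, hes, pvStem, hkey, hdict, hlen]
              have h := pv_slice_eq w 1 (by norm_num)
                (by simp [PySem.Str.len_eq]; omega)
              simpa [PySem.Str.len_eq] using h
            · simp [List.foldl, hing, hed, hly, hes, pvStem, hkey, hdict, hlen]
          · -- last character matches no suffix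
            have hdict := pv_getD_other c hg hd hy hs
            have hing : PySem.Chars.endswith w.toList ['i','n','g'] = false := by
              apply pv_ends_false; rw [hw, ← List.reverse_prefix]
              simp [List.cons_prefix_cons]
              exact fun h _ => hg h.symm
            have hed : PySem.Chars.endswith w.toList ['e','d'] = false := by
              apply pv_ends_false; rw [hw, ← List.reverse_prefix]
              simp [List.cons_prefix_cons]
              exact fun h _ => hd h.symm
            have hly : PySem.Chars.endswith w.toList ['l','y'] = false := by
              apply pv_ends_false; rw [hw, ← List.reverse_prefix]
              simp [List.cons_prefix_cons]
              exact fun h _ => hy h.symm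
            have hes : PySem.Chars.endswith w.toList ['s'] = false := by
              apply pv_ends_false; rw [hw, ← List.reverse_prefix]
              simp [List.cons_prefix_cons]
              exact fun h => hs h.symm
            simp [List.foldl, hing, hed, hly, hes, pvStem, hkey, hdict]

-- ===== VERDICT (by name: the statement is the Claim_ definition above) =====
theorem stemming_spec : Claim_equal_stemming := by
  intro tokens _
  unfold Spec_stemming stemming stemming_alt
  rw [PySem.List.foldl_append_singleton_eq_map]
  exact List.map_congr_left (fun w _ => pv_word_eq w)
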